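-- pv_equiv track=rewrite | github.com/AlvaroMosGar/Juegos_Python | Juegos/ahorcado/ahorcado.py | inicio
-- ===== SOURCE A (Python) =====
-- def inicio(txt):
--   a = ""
--   for i in range(len(txt)):
--     if txt[i] != " ":
--       a = a + "_ "
--     else:
--       a = a + " "
--   return a
-- ===== SOURCE B (Python) =====
-- def inicio(txt):
--   words = txt.split(" ")
--   return " ".join("_ " * len(w) for w in words)
-- ===== Notes on version B (the rewrite author's own statement) =====
-- stated objective: alternative
-- what changed: B splits the text on single spaces, builds a '_ ' mask per word by string repetition, and rejoins with ' ', instead of A's character-by-character scan with an if per character.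
import Mathlib
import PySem

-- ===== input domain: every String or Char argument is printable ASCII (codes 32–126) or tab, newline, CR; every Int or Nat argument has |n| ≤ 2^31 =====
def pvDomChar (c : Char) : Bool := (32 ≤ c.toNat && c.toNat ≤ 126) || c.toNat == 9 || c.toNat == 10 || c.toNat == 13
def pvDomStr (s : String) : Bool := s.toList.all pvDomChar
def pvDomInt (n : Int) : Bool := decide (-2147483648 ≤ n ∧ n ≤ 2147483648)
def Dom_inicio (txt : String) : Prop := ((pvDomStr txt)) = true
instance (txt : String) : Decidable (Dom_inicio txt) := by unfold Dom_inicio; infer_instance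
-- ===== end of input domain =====

-- B masks the text word-by-word (split on " ", "_ " per character, rejoin with " ") instead of A's per-character scan; same cost, different decomposition.

-- ===== PORT A =====
def inicio (txt : String) : String :=
  String.ofList ((PySem.List.pyRange 0 (PySem.Str.len txt) 1).foldl
    (fun a i => if PySem.List.pyGetD txt.toList i ' ' ≠ ' ' then a ++ ['_', ' '] else a ++ [' ']) [])

-- ===== PORT B =====
-- '"_ " * len(w)' ported as flattening len(w) copies of "_ "; split(" ")/join(" ") as List.splitOn/intercalate on single-char sep (exact for nonempty sep).
def inicio_alt (txt : String) : String :=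
  String.ofList (List.intercalate [' ']
    (((txt.toList.splitOn ' ').map (fun w => (List.replicate w.length ['_', ' ']).flatten))))

-- ===== PRECONDITION & SPEC =====
def Spec_inicio (txt : String) (out : String) : Prop := out = inicio_alt txt
instance (txt : String) (out : String) : Decidable (Spec_inicio txt out) := by unfold Spec_inicio; infer_instance

-- ===== CLAIM (what is proved, stated in full; the proofs are below) =====
def Claim_equal_inicio : Prop := ∀ (txt : String), Dom_inicio txt → Spec_inicio txt (inicio txt)

-- ===== LEMMAS AND PROOFS =====

def pvMask (c : Char) : List Char := if c ≠ ' ' then ['_', ' '] else [' ']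

theorem pv_foldl_mask (cs : List Char) (init : List Char) :
    cs.foldl (fun a c => if c ≠ ' ' then a ++ ['_', ' '] else a ++ [' ']) init
      = init ++ cs.flatMap pvMask := by
  induction cs generalizing init with
  | nil => simp
  | cons c cs ih =>
    simp only [List.foldl_cons]
    rw [ih]
    by_cases h : c = ' ' <;> simp [pvMask, h, List.append_assoc]

theorem pv_intercalate_cons_cons (s a b : List Char) (t : List (List Char)) :
    List.intercalate s (a :: b :: t) = a ++ s ++ List.intercalate s (b :: t) := by
  simp [List.intercalate, List.intersperse_cons₂, List.append_assoc]

theorem pv_intercalate_head_append (s x a : List Char) (t : List (List Char)) :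
    List.intercalate s ((x ++ a) :: t) = x ++ List.intercalate s (a :: t) := by
  cases t with
  | nil => simp [List.intercalate]
  | cons b t => simp [pv_intercalate_cons_cons, List.append_assoc]

theorem pv_main (cs : List Char) :
    List.intercalate [' '] ((cs.splitOn ' ').map (fun w => (List.replicate w.length ['_', ' ']).flatten))
      = cs.flatMap pvMask := by
  induction cs with
  | nil => simp [List.splitOn, List.splitOnP_nil, List.intercalate]
  | cons c cs ih =>
    simp only [List.splitOn] at *
    rw [List.splitOnP_cons]
    by_cases h : c = ' '
    · subst h
      simp only [beq_self_eq_true, if_true, List.map_cons]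
      obtain ⟨hd, tl, hsp⟩ := List.exists_cons_of_ne_nil (List.splitOnP_ne_nil (· == ' ') cs)
      rw [hsp] at ih ⊢
      simp only [List.map_cons]
      rw [pv_intercalate_cons_cons]
      simp only [List.map_cons] at ih
      rw [ih]
      simp [pvMask]
    · have hbeq : (c == ' ') = false := by simp [h]
      simp only [hbeq, if_false, Bool.false_eq_true]
      obtain ⟨hd, tl, hsp⟩ := List.exists_cons_of_ne_nil (List.splitOnP_ne_nil (· == ' ') cs)
      rw [hsp] at ih ⊢
      simp only [List.modifyHead_cons, List.map_cons, List.length_cons, List.replicate_succ,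
        List.flatten_cons, List.flatMap_cons]
      rw [pv_intercalate_head_append]
      simp only [List.map_cons] at ih
      rw [ih]
      simp [pvMask, h]

-- ===== VERDICT (by name: the statement is the Claim_ definition above) =====
theorem inicio_spec : Claim_equal_inicio := by
  intro txt _
  unfold Spec_inicio inicio inicio_alt
  rw [pv_main]
  congr 1
  have := PySem.List.foldl_pyRange_zero_pyGetD' txt.toList ' '
    (fun a c => if c ≠ ' ' then a ++ ['_', ' '] else a ++ [' ']) ([] : List Char)
  simp only [PySem.Str.len_eq] at *
  rw [this, pv_foldl_mask]
  simp
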